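-- pv_equiv track=rewrite | github.com/thiagofernandes1987-create/APEX | algorithms/uco-sensor/sensor-api/sensor_core/uco_bridge.py | _estimate_duplicates
-- ===== SOURCE A (Python) =====
-- from typing import Optional, List, Dict, Any, Set, Tuple
--
-- def _estimate_duplicates(source: str) -> int:
--     """
--     Detecta blocos de código duplicados por hash de linhas normalizadas.
--
--     Algoritmo:
--       1. Normaliza cada linha (remove espaços, lowercase, strip comentários)
--       2. Conta LINHAS individuais que aparecem 2+ vezes (single-line dups)
--       3. Conta blocos de 3 linhas que aparecem 2+ vezes (block dups)
--       4. Retorna contagem de padrões únicos duplicados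
--
--     Exemplo de CODE_BROKEN:
--       'if not token: return false' × 3 → 1 padrão de linha duplicada
--       'h = hash(token)' × 3             → 1 padrão de linha duplicada
--       Total = 2 ✓
--     """
--     lines = [
--         l.strip().lower().split("#")[0].strip()
--         for l in source.splitlines()
--         if l.strip() and not l.strip().startswith("#")
--     ]
--
--     if not lines:
--         return 0
--
--     dup_patterns: set = set()
--
--     # Nível 1: linhas individuais duplicadas (>= 2 ocorrências)
--     line_counts: Dict[str, int] = {}
--     for line in lines:
--         if len(line) >= 5:   # ignorar linhas triviais como 'pass', 'else:', etc.
--             line_counts[line] = line_counts.get(line, 0) + 1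
--     for line, cnt in line_counts.items():
--         if cnt >= 2:
--             dup_patterns.add(("line", line))
--
--     # Nível 2: blocos de 3 linhas duplicados
--     if len(lines) >= 3:
--         block_counts: Dict[str, int] = {}
--         for i in range(len(lines) - 2):
--             block = "\n".join(lines[i:i + 3])
--             block_counts[block] = block_counts.get(block, 0) + 1
--         for block, cnt in block_counts.items():
--             if cnt >= 2:
--                 dup_patterns.add(("block3", block))
--
--     return len(dup_patterns)
-- ===== SOURCE B (Python) =====
-- def _estimate_duplicates(source: str) -> int:
--     lines = [
--         l.strip().lower().split("#")[0].strip()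
--         for l in source.splitlines()
--         if l.strip() and not l.strip().startswith("#")
--     ]
--     # sort-then-scan: equal patterns become adjacent, so a duplicated pattern
--     # is exactly a run of length >= 2 in the sorted list; no dict/set needed.
--     singles = sorted(l for l in lines if len(l) >= 5)
--     blocks = sorted("\n".join(lines[i:i + 3]) for i in range(len(lines) - 2))
--     return _dup_runs(singles) + _dup_runs(blocks)
--
--
-- def _dup_runs(s):
--     """s sorted: count maximal runs of equal elements having length >= 2."""
--     total = 0
--     i = 0
--     n = len(s)
--     while i < n:
--         j = i + 1
--         while j < n and s[j] == s[i]: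
--             j += 1
--         if j - i >= 2:
--             total += 1
--         i = j
--     return total
-- ===== Notes on version B (the rewrite author's own statement) =====
-- stated objective: alternative
-- what changed: Replaces both hash-count-dict-then-filter passes and the duplicate set by sort-then-scan: the candidate single lines and 3-line blocks are each sorted, and a two-pointer run scan counts maximal runs of length >= 2, which are exactly the duplicated patterns; no dict or set is used.
import Mathlib
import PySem

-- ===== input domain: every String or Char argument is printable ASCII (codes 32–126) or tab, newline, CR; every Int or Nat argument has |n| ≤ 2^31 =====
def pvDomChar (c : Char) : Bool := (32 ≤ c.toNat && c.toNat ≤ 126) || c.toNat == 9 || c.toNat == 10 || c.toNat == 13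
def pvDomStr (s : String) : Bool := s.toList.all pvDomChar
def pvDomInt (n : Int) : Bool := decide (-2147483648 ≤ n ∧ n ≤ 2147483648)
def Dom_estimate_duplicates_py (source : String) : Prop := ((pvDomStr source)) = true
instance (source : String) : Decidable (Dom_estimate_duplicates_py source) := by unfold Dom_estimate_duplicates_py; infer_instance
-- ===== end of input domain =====

-- B replaces A's hash-count-dict-then-filter passes and duplicate set by sort-then-scan:
-- sort the candidate lines / 3-line blocks and count runs of length >= 2; objective: alternative.

-- ===== PORT A =====
-- normalization of a raw line: l.strip().lower().split("#")[0].strip().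
-- "#" is a non-empty separator, so split? is always `some` (the .getD [] default is never taken)
-- and the [0] index always exists (rendered as pyGetD with default "").
def estimate_duplicates_py (source : String) : Int :=
  let lines := ((PySem.Str.splitlines source).filter
      (fun l => !(PySem.Str.strip l == "") && !PySem.Str.startswith (PySem.Str.strip l) "#")).map
      (fun l => PySem.Str.strip (PySem.List.pyGetD
        ((PySem.Str.split? (PySem.Str.lower (PySem.Str.strip l)) "#").getD []) 0 ""))
  if lines = [] then 0
  else
    let line_counts : PySem.Dict String Int := lines.foldl (fun d line =>
        if 5 ≤ PySem.Str.len line then d.insert line (d.getD line 0 + 1) else d) PySem.Dict.empty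
    let dup1 : PySem.Set (String × String) := line_counts.items.foldl (fun s p =>
        if 2 ≤ p.2 then s.add ("line", p.1) else s) PySem.Set.empty
    let dup2 :=
      if 3 ≤ lines.length then
        let block_counts : PySem.Dict String Int :=
          (PySem.List.pyRange 0 ((lines.length : Int) - 2) 1).foldl (fun d i =>
            let block := PySem.Str.join "\n" (PySem.List.slice lines (some i) (some (i + 3)))
            d.insert block (d.getD block 0 + 1)) PySem.Dict.empty
        block_counts.items.foldl (fun s p =>
            if 2 ≤ p.2 then s.add ("block3", p.1) else s) dup1
      else dup1
    PySem.Set.len dup2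

-- ===== PORT B =====
-- _dup_runs: two-pointer run scan over a sorted list; the inner `while j < n and s[j] == s[i]`
-- advances j over the equal prefix, so j - i = 1 + length of the equal prefix of the tail (k);
-- the outer loop then restarts at i = j, i.e. recurses on the tail with that prefix dropped.
def pv_dup_runs (s : List String) : Int :=
  match s with
  | [] => 0
  | a :: t =>
    let k := (t.takeWhile (fun x => x == a)).length
    (if 2 ≤ k + 1 then (1 : Int) else 0) + pv_dup_runs (t.drop k)
termination_by s.length
decreasing_by simp only [List.length_drop, List.length_cons]; omega

def estimate_duplicates_py_alt (source : String) : Int :=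
  let lines := ((PySem.Str.splitlines source).filter
      (fun l => !(PySem.Str.strip l == "") && !PySem.Str.startswith (PySem.Str.strip l) "#")).map
      (fun l => PySem.Str.strip (PySem.List.pyGetD
        ((PySem.Str.split? (PySem.Str.lower (PySem.Str.strip l)) "#").getD []) 0 ""))
  let singles := PySem.List.sorted
      (lines.filter (fun l => decide (5 ≤ PySem.Str.len l))) (fun x => x) false
  let blocks := PySem.List.sorted
      ((PySem.List.pyRange 0 ((lines.length : Int) - 2) 1).map
        (fun i => PySem.Str.join "\n" (PySem.List.slice lines (some i) (some (i + 3)))))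
      (fun x => x) false
  pv_dup_runs singles + pv_dup_runs blocks

-- ===== PRECONDITION & SPEC =====
def Spec_estimate_duplicates_py (source : String) (out : Int) : Prop := out = estimate_duplicates_py_alt source
instance (source : String) (out : Int) : Decidable (Spec_estimate_duplicates_py source out) := by unfold Spec_estimate_duplicates_py; infer_instance

-- ===== CLAIM (what is proved, stated in full; the proofs are below) =====
def Claim_equal_estimate_duplicates_py : Prop := ∀ (source : String), Dom_estimate_duplicates_py source → Spec_estimate_duplicates_py source (estimate_duplicates_py source)

-- ===== LEMMAS AND PROOFS =====

-- canonical nodup list of the duplicated patterns of l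
def pvDL (l : List String) : List String :=
  (PySem.List.dedup l).filter (fun x => decide (2 ≤ l.count x))

theorem pvDL_nodup (l : List String) : (pvDL l).Nodup :=
  (PySem.List.nodup_dedup l).filter _

theorem pvDL_mem (l : List String) (x : String) : x ∈ pvDL l ↔ 2 ≤ l.count x := by
  unfold pvDL
  simp only [List.mem_filter, PySem.List.mem_dedup, decide_eq_true_eq]
  constructor
  · exact fun h => h.2
  · exact fun h => ⟨List.count_pos_iff.mp (by omega), h⟩

-- Finset form of "number of duplicated patterns"
theorem pvDL_card (l : List String) :
    (pvDL l).length = (l.toFinset.filter (fun x => 2 ≤ l.count x)).card := by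
  have hfs : (pvDL l).toFinset = l.toFinset.filter (fun x => 2 ≤ l.count x) := by
    ext x
    simp only [List.mem_toFinset, Finset.mem_filter, pvDL_mem]
    exact ⟨fun h => ⟨List.count_pos_iff.mp (by omega), h⟩, fun h => h.2⟩
  rw [← List.toFinset_card_of_nodup (pvDL_nodup l), hfs]

-- head of dropWhile fails the predicate
theorem pv_dropWhile_head {α : Type} (p : α → Bool) (l : List α) (b : α) (r : List α)
    (h : l.dropWhile p = b :: r) : p b = false := by
  induction l with
  | nil => simp at h
  | cons x t ih =>
    rw [List.dropWhile_cons] at h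
    by_cases hp : p x = true
    · rw [if_pos hp] at h; exact ih h
    · rw [if_neg hp] at h
      cases h
      simpa using hp

-- in a (≤)-sorted list the head is minimal
theorem pv_sorted_head_le (b : String) (r : List String)
    (h : (b :: r).Pairwise (fun a c => a ≤ c)) : ∀ x ∈ b :: r, b ≤ x := by
  intro x hx
  rcases List.mem_cons.mp hx with rfl | hx
  · exact le_refl x
  · exact (List.pairwise_cons.mp h).1 x hx

-- the core run-scan lemma: on a sorted list, pv_dup_runs counts the distinct
-- elements of multiplicity ≥ 2
theorem pv_runs_sorted_aux : ∀ (n : ℕ) (s : List String), s.length ≤ n →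
    s.Pairwise (fun a c => a ≤ c) →
    pv_dup_runs s = ((s.toFinset.filter (fun x => 2 ≤ s.count x)).card : Int) := by
  intro n
  induction n with
  | zero =>
    intro s hlen _
    rw [List.length_eq_zero_iff.mp (Nat.le_zero.mp hlen)]
    simp [pv_dup_runs]
  | succ n ih =>
    intro s hlen hs
    match s with
    | [] => simp [pv_dup_runs]
    | a :: t =>
      -- run decomposition
      set k := (t.takeWhile (fun x => x == a)).length with hk
      have hrep : t.takeWhile (fun x => x == a) = List.replicate k a := by
        apply List.eq_replicate_of_mem
        intro b hb
        have := List.mem_takeWhile_imp hb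
        exact eq_of_beq this
      have hsplit : t = List.replicate k a ++ t.dropWhile (fun x => x == a) := by
        conv_lhs => rw [← List.takeWhile_append_dropWhile (p := fun x => x == a) (l := t)]
        rw [hrep]
      set t' := t.dropWhile (fun x => x == a) with ht'
      have hdrop : t.drop k = t' := by
        conv_lhs => rw [hsplit]
        rw [List.drop_left' (by simp)]
      have ht'len : t'.length ≤ n := by
        have : t'.Sublist t := List.dropWhile_sublist _
        have := this.length_le
        simp only [List.length_cons] at hlen
        omega
      obtain ⟨ha, ht⟩ := List.pairwise_cons.mp hs
      have ht's : t'.Pairwise (fun a c => a ≤ c) := ht.sublist (List.dropWhile_sublist _)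
      -- a does not occur in t'
      have hant' : a ∉ t' := by
        intro hmem
        cases h : t' with
        | nil => rw [h] at hmem; simp at hmem
        | cons b r =>
          have hba : ¬ (b = a) := by
            have := pv_dropWhile_head _ _ _ _ (ht'.symm.trans h)
            simpa using this
          have hb : b ∈ t := by rw [hsplit, h]; simp
          have hble : b ≤ a := pv_sorted_head_le b r (h ▸ ht's) a (h ▸ hmem)
          exact hba (le_antisymm hble (ha b hb))
      have hnot : ∀ x ∈ t', x ≠ a := fun x hx hxa => hant' (hxa ▸ hx)
      -- counts
      have hcount_a : (a :: t).count a = k + 1 := by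
        rw [List.count_cons_self, hsplit, List.count_append]
        rw [List.count_eq_zero_of_not_mem hant', List.count_replicate]
        simp
      have hcount_ne : ∀ x, x ≠ a → (a :: t).count x = t'.count x := by
        intro x hx
        rw [List.count_cons_of_ne (Ne.symm hx), hsplit, List.count_append, List.count_replicate,
          if_neg (by simpa using Ne.symm hx)]
        omega
      -- toFinset
      have hfin : (a :: t).toFinset = insert a t'.toFinset := by
        ext x
        simp only [List.toFinset_cons, Finset.mem_insert, List.mem_toFinset]
        conv_lhs => rw [hsplit]
        simp only [List.mem_append, List.mem_replicate]
        constructor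
        · rintro (rfl | (⟨-, rfl⟩ | h)) <;> [exact Or.inl rfl; exact Or.inl rfl; exact Or.inr h]
        · rintro (rfl | h) <;> [exact Or.inl rfl; exact Or.inr (Or.inr h)]
      -- the Finset count
      have hcard : ((a :: t).toFinset.filter (fun x => 2 ≤ (a :: t).count x)).card =
          (if 1 ≤ k then 1 else 0) + (t'.toFinset.filter (fun x => 2 ≤ t'.count x)).card := by
        rw [hfin, Finset.filter_insert]
        have hfeq : t'.toFinset.filter (fun x => 2 ≤ (a :: t).count x) =
            t'.toFinset.filter (fun x => 2 ≤ t'.count x) := by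
          apply Finset.filter_congr
          intro x hx
          rw [hcount_ne x (hnot x (List.mem_toFinset.mp hx))]
        by_cases h1 : 1 ≤ k
        · rw [if_pos (by rw [hcount_a]; omega), if_pos h1, hfeq,
            Finset.card_insert_of_notMem (by simp [hant'])]
          omega
        · rw [if_neg (by rw [hcount_a]; omega), if_neg h1, hfeq]
          omega
      -- the scan
      rw [pv_dup_runs]
      simp only [← hk, hdrop]
      rw [ih t' ht'len ht's, hcard]
      by_cases h1 : 1 ≤ k
      · rw [if_pos (by omega), if_pos h1]; push_cast; ring
      · rw [if_neg (by omega), if_neg h1]; push_cast; ring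

theorem pv_druns (l : List String) :
    pv_dup_runs (PySem.List.sorted l (fun x => x) false) = ((pvDL l).length : Int) := by
  have hperm := PySem.List.sorted_perm l (fun x => x) false
  rw [pv_runs_sorted_aux (PySem.List.sorted l (fun x => x) false).length _ le_rfl
      (PySem.List.sorted_pairwise l (fun x => x)),
    pvDL_card]
  have hc : {x ∈ (PySem.List.sorted l (fun x => x) false).toFinset |
      2 ≤ List.count x (PySem.List.sorted l (fun x => x) false)}.card =
      {x ∈ l.toFinset | 2 ≤ List.count x l}.card := by
    rw [List.toFinset_eq_of_perm _ _ hperm]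
    congr 1
    apply Finset.filter_congr
    intro x _
    rw [hperm.count_eq]
  rw [hc]

-- conditional add-fold = plain add-fold over the filtered list
theorem pv_foldl_add_if {α β : Type} [BEq α] (l : List β) (P : β → Prop) [DecidablePred P]
    (f : β → α) (init : PySem.Set α) :
    l.foldl (fun s p => if P p then PySem.Set.add s (f p) else s) init =
    (l.filter (fun p => decide (P p))).foldl (fun s p => PySem.Set.add s (f p)) init := by
  rw [List.foldl_filter]
  congr 1
  funext s p
  by_cases h : P p <;> simp [h]

theorem pv_nodup_foldl_add {α β : Type} [BEq α] [LawfulBEq α] (l : List β) (f : β → α)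
    (s : PySem.Set α) (hs : s.Nodup) :
    (l.foldl (fun s b => PySem.Set.add s (f b)) s).Nodup := by
  induction l generalizing s with
  | nil => exact hs
  | cons x t ih => exact ih _ (PySem.Set.nodup_add _ _ hs)

-- A's filter-items pass over a counter dict: membership characterization
theorem pv_apass {α : Type} [BEq α] [LawfulBEq α] (zs : List α) (tag : String)
    (init : PySem.Set (String × α)) :
    ∀ y, y ∈ ((PySem.Dict.counter zs).items.foldl (fun s p =>
        if 2 ≤ p.2 then PySem.Set.add s (tag, p.1) else s) init) ↔
      y ∈ init ∨ ∃ k, 2 ≤ zs.count k ∧ y = (tag, k) := by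
  intro y
  rw [PySem.Dict.items_counter,
    pv_foldl_add_if _ (fun p : α × Int => 2 ≤ p.2) (fun p => (tag, p.1)) init,
    PySem.Set.mem_foldl_add]
  simp only [List.mem_filter, List.mem_map, PySem.Set.mem_ofList, decide_eq_true_eq]
  constructor
  · rintro (hy | ⟨p, ⟨⟨k, hk, rfl⟩, h2⟩, rfl⟩)
    · exact Or.inl hy
    · refine Or.inr ⟨k, ?_, rfl⟩
      simp only [] at h2; exact_mod_cast h2
  · rintro (hy | ⟨k, h2, rfl⟩)
    · exact Or.inl hy
    · refine Or.inr ⟨(k, (zs.count k : Int)), ⟨⟨k, ?_, rfl⟩,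
        by show (2 : Int) ≤ ((zs.count k : Int)); exact_mod_cast h2⟩, rfl⟩
      exact List.count_pos_iff.mp (by omega)

theorem pv_apass_nodup {α : Type} [BEq α] [LawfulBEq α] (zs : List α) (tag : String)
    (init : PySem.Set (String × α)) (h : init.Nodup) :
    ((PySem.Dict.counter zs).items.foldl (fun s p =>
        if 2 ≤ p.2 then PySem.Set.add s (tag, p.1) else s) init).Nodup := by
  rw [pv_foldl_add_if _ (fun p : α × Int => 2 ≤ p.2) (fun p => (tag, p.1)) init]
  exact pv_nodup_foldl_add _ _ _ h

-- A's conditional count-fold = counter of the length-filtered list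
theorem pv_count_filter (L : List String) :
    L.foldl (fun d line => if 5 ≤ PySem.Str.len line then d.insert line (d.getD line 0 + 1) else d)
      PySem.Dict.empty =
    PySem.Dict.counter (L.filter (fun line => decide (5 ≤ PySem.Str.len line))) := by
  rw [← PySem.Dict.foldl_insert_getD_add_one_eq_counter, List.foldl_filter]
  congr 1
  funext d line
  by_cases h : 5 ≤ PySem.Str.len line
  · rw [if_pos h, if_pos (by simpa using h)]
  · rw [if_neg h, if_neg (by simpa using h)]

-- A's block-count loop over range = counter of the index-window list
theorem pv_ablocks (L : List String) :
    (PySem.List.pyRange 0 ((L.length : Int) - 2) 1).foldl (fun d i =>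
        d.insert (PySem.Str.join "\n" (PySem.List.slice L (some i) (some (i + 3))))
          (d.getD (PySem.Str.join "\n" (PySem.List.slice L (some i) (some (i + 3)))) 0 + 1))
      PySem.Dict.empty =
    PySem.Dict.counter ((PySem.List.pyRange 0 ((L.length : Int) - 2) 1).map
      (fun i => PySem.Str.join "\n" (PySem.List.slice L (some i) (some (i + 3))))) := by
  rw [← PySem.Dict.foldl_insert_getD_add_one_eq_counter, List.foldl_map]

-- size of A's combined tagged duplicate set = |dup singles| + |dup blocks|
theorem pv_main_sets (ys blocks : List String) :
    PySem.Set.len ((PySem.Dict.counter blocks).items.foldl (fun s p =>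
        if 2 ≤ p.2 then PySem.Set.add s ("block3", p.1) else s)
      ((PySem.Dict.counter ys).items.foldl (fun s p =>
        if 2 ≤ p.2 then PySem.Set.add s ("line", p.1) else s) PySem.Set.empty)) =
    ((pvDL ys).length : Int) + ((pvDL blocks).length : Int) := by
  have hTnd := pv_apass_nodup blocks "block3" _
    (pv_apass_nodup ys "line" PySem.Set.empty List.nodup_nil)
  have hTmem := pv_apass blocks "block3"
    ((PySem.Dict.counter ys).items.foldl (fun s p =>
        if 2 ≤ p.2 then PySem.Set.add s ("line", p.1) else s) PySem.Set.empty)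
  have hSmem := pv_apass ys "line" (PySem.Set.empty)
  set E := ((pvDL ys).map (fun k => (("line" : String), k))) ++
           ((pvDL blocks).map (fun b => (("block3" : String), b))) with hE
  have hEnd : E.Nodup := by
    refine List.Nodup.append ?_ ?_ ?_
    · exact (pvDL_nodup ys).map (fun a b h => by simpa using h)
    · exact (pvDL_nodup blocks).map (fun a b h => by simpa using h)
    · intro p hp1 hp2
      obtain ⟨k, -, rfl⟩ := List.mem_map.mp hp1
      obtain ⟨b, -, hb⟩ := List.mem_map.mp hp2
      have := congrArg Prod.fst hb
      simp at this
  have hmem : ∀ p, p ∈ ((PySem.Dict.counter blocks).items.foldl (fun s p =>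
        if 2 ≤ p.2 then PySem.Set.add s ("block3", p.1) else s)
      ((PySem.Dict.counter ys).items.foldl (fun s p =>
        if 2 ≤ p.2 then PySem.Set.add s ("line", p.1) else s) PySem.Set.empty)) ↔ p ∈ E := by
    intro p
    rw [hTmem p, hSmem p, hE]
    simp only [List.mem_append, List.mem_map, PySem.Set.empty, List.not_mem_nil, false_or]
    constructor
    · rintro ((⟨k, h2, rfl⟩) | ⟨b, h2, rfl⟩)
      · exact Or.inl ⟨k, (pvDL_mem ys k).mpr h2, rfl⟩
      · exact Or.inr ⟨b, (pvDL_mem blocks b).mpr h2, rfl⟩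
    · rintro (⟨k, hk, rfl⟩ | ⟨b, hb, rfl⟩)
      · exact Or.inl ⟨k, (pvDL_mem ys k).mp hk, rfl⟩
      · exact Or.inr ⟨b, (pvDL_mem blocks b).mp hb, rfl⟩
  have hperm := (List.perm_ext_iff_of_nodup hTnd hEnd).mpr hmem
  rw [PySem.Set.len_eq, hperm.length_eq, hE]
  simp [List.length_append]

-- the whole claim, abstracted over the shared normalized-line list
theorem pv_core (L : List String) :
    (if L = [] then (0 : Int)
     else
      let line_counts : PySem.Dict String Int := L.foldl (fun d line =>
          if 5 ≤ PySem.Str.len line then d.insert line (d.getD line 0 + 1) else d) PySem.Dict.empty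
      let dup1 : PySem.Set (String × String) := line_counts.items.foldl (fun s p =>
          if 2 ≤ p.2 then s.add ("line", p.1) else s) PySem.Set.empty
      let dup2 :=
        if 3 ≤ L.length then
          let block_counts : PySem.Dict String Int :=
            (PySem.List.pyRange 0 ((L.length : Int) - 2) 1).foldl (fun d i =>
              let block := PySem.Str.join "\n" (PySem.List.slice L (some i) (some (i + 3)))
              d.insert block (d.getD block 0 + 1)) PySem.Dict.empty
          block_counts.items.foldl (fun s p =>
              if 2 ≤ p.2 then s.add ("block3", p.1) else s) dup1
        else dup1
      PySem.Set.len dup2) =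
    (pv_dup_runs (PySem.List.sorted (L.filter (fun l => decide (5 ≤ PySem.Str.len l)))
        (fun x => x) false) +
     pv_dup_runs (PySem.List.sorted ((PySem.List.pyRange 0 ((L.length : Int) - 2) 1).map
        (fun i => PySem.Str.join "\n" (PySem.List.slice L (some i) (some (i + 3)))))
        (fun x => x) false)) := by
  by_cases hL : L = []
  · subst hL
    have hr : PySem.List.pyRange 0 ((([] : List String).length : Int) - 2) 1 = [] := by
      rw [PySem.List.pyRange_one]
      norm_num
    rw [if_pos rfl, hr]
    simp only [List.map_nil, List.filter_nil]
    have h0 : PySem.List.sorted ([] : List String) (fun x => x) false = [] := rfl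
    rw [h0, pv_dup_runs]
    norm_num
  · rw [if_neg hL]
    simp only [pv_count_filter, pv_druns]
    by_cases h3 : 3 ≤ L.length
    · rw [if_pos h3]
      simp only [pv_ablocks L]
      exact pv_main_sets _ _
    · rw [if_neg h3]
      have hr : PySem.List.pyRange 0 ((L.length : Int) - 2) 1 = [] := by
        rw [PySem.List.pyRange_one]
        have hz : (((L.length : Int) - 2) - 0).toNat = 0 := by omega
        rw [hz]
        simp
      rw [hr]
      have h0 : ((PySem.Dict.counter ([] : List String)).items.foldl (fun s p =>
          if 2 ≤ p.2 then PySem.Set.add s ("block3", p.1) else s)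
        ((PySem.Dict.counter (L.filter (fun line => decide (5 ≤ PySem.Str.len line)))).items.foldl
          (fun s p => if 2 ≤ p.2 then PySem.Set.add s ("line", p.1) else s) PySem.Set.empty)) =
        ((PySem.Dict.counter (L.filter (fun line => decide (5 ≤ PySem.Str.len line)))).items.foldl
          (fun s p => if 2 ≤ p.2 then PySem.Set.add s ("line", p.1) else s) PySem.Set.empty) := rfl
      rw [← h0]
      simp only [List.map_nil]
      exact pv_main_sets _ _

-- ===== VERDICT (by name: the statement is the Claim_ definition above) =====
theorem estimate_duplicates_py_spec : Claim_equal_estimate_duplicates_py := by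
  intro source _
  unfold Spec_estimate_duplicates_py estimate_duplicates_py estimate_duplicates_py_alt
  exact pv_core _
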